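-- pv_equiv track=rewrite | github.com/Sharp-4rth/temporal_belief_analysis | src/temporal_belief/data/preprocessors.py | mark_quotes
-- ===== SOURCE A (Python) =====
-- def mark_quotes(text):
--     """Replace ConvoKit quote markers with standard quotation marks."""
--
--     # Split text into lines for processing
--     lines = text.split('\n')
--     result_lines = []
--     in_quote = False
--
--     for line in lines:
--         # Check if line starts a quote (begins with &gt;)
--         if line.strip().startswith('&gt;'):
--             if not in_quote:
--                 # Start of new quote - replace &gt; with opening quote
--                 cleaned_line = line.replace('&gt;', '"', 1).lstrip()
--                 result_lines.append(cleaned_line)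
--                 in_quote = True
--             else:
--                 # Continuation of quote - just remove &gt;
--                 cleaned_line = line.replace('&gt;', '', 1).lstrip()
--                 result_lines.append(cleaned_line)
--
--         # Check if we're ending a quote (empty line or no more &gt; markers)
--         elif in_quote and (line.strip() == '' or not line.strip().startswith('&gt;')):
--             # End the quote by adding closing quote to previous line
--             if result_lines and not result_lines[-1].strip().endswith('"'):
--                 result_lines[-1] = result_lines[-1].rstrip() + '"'
--
--             # Add current line if it's not empty
--             if line.strip():
--                 result_lines.append(line)
--             else:
--                 result_lines.append(line)  # Keep empty lines
--
--             in_quote = False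
--
--         else:
--             # Regular line, not in quote
--             result_lines.append(line)
--
--     # Handle case where quote goes to end of text
--     if in_quote and result_lines and not result_lines[-1].strip().endswith('"'):
--         result_lines[-1] = result_lines[-1].rstrip() + '"'
--
--     return '\n'.join(result_lines)
-- ===== SOURCE B (Python) =====
-- def mark_quotes(text):
--     """Replace ConvoKit quote markers with standard quotation marks."""
--     lines = text.split('\n')
--     out = []
--     i = 0
--     n = len(lines)
--     while i < n:
--         line = lines[i]
--         if line.strip().startswith('&gt;'):
--             # find the end of this run of quote lines
--             j = i + 1
--             while j < n and lines[j].strip().startswith('&gt;'):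
--                 j += 1
--             block = [line.replace('&gt;', '"', 1).lstrip()]
--             block += [x.replace('&gt;', '', 1).lstrip() for x in lines[i + 1:j]]
--             if not block[-1].strip().endswith('"'):
--                 block[-1] = block[-1].rstrip() + '"'
--             out.extend(block)
--             i = j
--         else:
--             out.append(line)
--             i += 1
--     return '\n'.join(out)
-- ===== Notes on version B (the rewrite author's own statement) =====
-- stated objective: alternative
-- what changed: Replaces the stateful line-by-line loop with an in_quote flag and in-place patching of the previous result line by a grouping pass: each maximal run of '&gt;'-quote lines is collected as a block, transformed, closed once at its end, and emitted; non-quote lines pass through unchanged.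
import Mathlib
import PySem

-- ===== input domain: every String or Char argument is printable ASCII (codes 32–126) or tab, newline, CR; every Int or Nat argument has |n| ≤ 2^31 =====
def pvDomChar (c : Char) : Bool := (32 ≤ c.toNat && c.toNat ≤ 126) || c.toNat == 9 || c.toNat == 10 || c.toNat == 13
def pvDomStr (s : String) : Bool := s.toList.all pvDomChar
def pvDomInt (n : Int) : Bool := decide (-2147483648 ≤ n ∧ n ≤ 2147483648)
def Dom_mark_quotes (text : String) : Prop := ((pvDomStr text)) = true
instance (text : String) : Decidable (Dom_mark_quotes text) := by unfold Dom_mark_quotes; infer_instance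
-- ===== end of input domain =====

-- B replaces A's stateful in_quote loop (which patches the previous result line in place)
-- by grouping the lines into maximal quote-line runs, transforming and closing each block
-- as a unit; same output, alternative decomposition (no speed claim).

-- shared primitives (both Pythons use the identical expressions)
-- s.replace(old, new, 1): exact for nonempty old (both programs only call it with '&gt;')
def pvReplace1 : List Char → List Char → List Char → List Char
  | [], _, _ => []
  | c :: t, old, new =>
    if old.isPrefixOf (c :: t) then new ++ List.drop old.length (c :: t)
    else c :: pvReplace1 t old new

def pvGt : List Char := ['&', 'g', 't', ';']

-- line.strip().startswith('&gt;')
def pvIsQ (l : List Char) : Bool := PySem.Chars.startswith (PySem.Chars.strip l) pvGt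

-- if rs and not rs[-1].strip().endswith('"'): rs[-1] = rs[-1].rstrip() + '"'
def pvCloseLast (rs : List (List Char)) : List (List Char) :=
  match rs.getLast? with
  | none => rs
  | some lst =>
    if PySem.Chars.endswith (PySem.Chars.strip lst) ['"'] then rs
    else rs.dropLast ++ [PySem.Chars.rstrip lst ++ ['"']]

-- ===== PORT A =====
def pvStepA (st : List (List Char) × Bool) (line : List Char) : List (List Char) × Bool :=
  if pvIsQ line then
    if st.2 = false then
      (st.1 ++ [PySem.Chars.lstrip (pvReplace1 line pvGt ['"'])], true)
    else
      (st.1 ++ [PySem.Chars.lstrip (pvReplace1 line pvGt [])], true)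
  else if st.2 && (PySem.Chars.strip line == ([] : List Char) || !pvIsQ line) then
    -- end the quote; append line (A appends it in both branches of its inner if)
    (if PySem.Chars.strip line ≠ ([] : List Char) then pvCloseLast st.1 ++ [line]
     else pvCloseLast st.1 ++ [line], false)
  else
    (st.1 ++ [line], st.2)

-- final flush: if in_quote and result_lines and not …endswith('"'): patch last line
def pvFinalA (st : List (List Char) × Bool) : List (List Char) :=
  if st.2 then pvCloseLast st.1 else st.1

def mark_quotes (text : String) : String :=
  let lines := PySem.Chars.splitOn text.toList ['\n']
  String.ofList (PySem.Chars.join ['\n'] (pvFinalA (lines.foldl pvStepA ([], false))))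

-- ===== PORT B =====
def pvFirstQ (x : List Char) : List Char := PySem.Chars.lstrip (pvReplace1 x pvGt ['"'])
def pvContQ (x : List Char) : List Char := PySem.Chars.lstrip (pvReplace1 x pvGt [])

def pvGoB : List (List Char) → List (List Char)
  | [] => []
  | l :: t =>
    if pvIsQ l then
      pvCloseLast (pvFirstQ l :: (t.takeWhile pvIsQ).map pvContQ) ++ pvGoB (t.dropWhile pvIsQ)
    else l :: pvGoB t
termination_by ls => ls.length
decreasing_by
  · exact Nat.lt_succ_of_le (List.length_dropWhile_le _ _)
  · simp

def mark_quotes_alt (text : String) : String :=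
  String.ofList (PySem.Chars.join ['\n'] (pvGoB (PySem.Chars.splitOn text.toList ['\n'])))

-- ===== PRECONDITION & SPEC =====
def Spec_mark_quotes (text : String) (out : String) : Prop := out = mark_quotes_alt text
instance (text : String) (out : String) : Decidable (Spec_mark_quotes text out) := by unfold Spec_mark_quotes; infer_instance

-- ===== CLAIM (what is proved, stated in full; the proofs are below) =====
def Claim_equal_mark_quotes : Prop := ∀ (text : String), Dom_mark_quotes text → Spec_mark_quotes text (mark_quotes text)

-- ===== LEMMAS AND PROOFS =====

lemma pvCloseLast_append (rs : List (List Char)) (x : List Char) :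
    pvCloseLast (rs ++ [x]) = rs ++ pvCloseLast [x] := by
  simp [pvCloseLast]
  split <;> simp

lemma pvCloseLast_cons (x y : List Char) (ys : List (List Char)) :
    pvCloseLast (x :: y :: ys) = x :: pvCloseLast (y :: ys) := by
  simp only [pvCloseLast, List.getLast?_cons_cons]
  rcases e : (y :: ys).getLast? with _ | l
  · simp at e
  · by_cases h2 : PySem.Chars.endswith (PySem.Chars.strip l) ['"'] = true <;> simp [h2]

lemma pvGoB_nil : pvGoB [] = [] := by rw [pvGoB]

lemma pvGoB_cons_q (l : List Char) (t : List (List Char)) (h : pvIsQ l = true) :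
    pvGoB (l :: t) =
      pvCloseLast (pvFirstQ l :: (t.takeWhile pvIsQ).map pvContQ) ++ pvGoB (t.dropWhile pvIsQ) := by
  rw [pvGoB]; simp [h]

lemma pvGoB_cons_nq (l : List Char) (t : List (List Char)) (h : pvIsQ l = false) :
    pvGoB (l :: t) = l :: pvGoB t := by
  rw [pvGoB]; simp [h]

lemma pvMain (n : Nat) : ∀ ls : List (List Char), ls.length ≤ n →
    (∀ rs, pvFinalA (ls.foldl pvStepA (rs, false)) = rs ++ pvGoB ls) ∧
    (∀ rs x, pvFinalA (ls.foldl pvStepA (rs ++ [x], true)) =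
      rs ++ pvCloseLast (x :: (ls.takeWhile pvIsQ).map pvContQ) ++ pvGoB (ls.dropWhile pvIsQ)) := by
  induction n with
  | zero =>
    intro ls hls
    have : ls = [] := List.eq_nil_of_length_eq_zero (Nat.le_zero.mp hls)
    subst this
    refine ⟨fun rs => ?_, fun rs x => ?_⟩
    · simp [pvFinalA, pvGoB_nil]
    · simp [pvFinalA, pvGoB_nil, pvCloseLast_append]
  | succ n ih =>
    intro ls hls
    cases ls with
    | nil =>
      refine ⟨fun rs => ?_, fun rs x => ?_⟩
      · simp [pvFinalA, pvGoB_nil]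
      · simp [pvFinalA, pvGoB_nil, pvCloseLast_append]
    | cons h t =>
      have ht : t.length ≤ n := Nat.le_of_succ_le_succ hls
      refine ⟨fun rs => ?_, fun rs x => ?_⟩
      · -- state (rs, false)
        by_cases hq : pvIsQ h = true
        · have step : pvStepA (rs, false) h =
              (rs ++ [pvFirstQ h], true) := by
            simp [pvStepA, hq, pvFirstQ]
          rw [List.foldl_cons, step, (ih t ht).2 rs (pvFirstQ h), pvGoB_cons_q h t hq]
          simp
        · have hq' : pvIsQ h = false := by simpa using hq
          have step : pvStepA (rs, false) h = (rs ++ [h], false) := by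
            simp [pvStepA, hq']
          rw [List.foldl_cons, step, (ih t ht).1 (rs ++ [h]), pvGoB_cons_nq h t hq']
          simp
      · -- state (rs ++ [x], true)
        by_cases hq : pvIsQ h = true
        · have step : pvStepA (rs ++ [x], true) h =
              ((rs ++ [x]) ++ [pvContQ h], true) := by
            simp [pvStepA, hq, pvContQ]
          rw [List.foldl_cons, step, (ih t ht).2 (rs ++ [x]) (pvContQ h)]
          rw [List.takeWhile_cons_of_pos hq, List.dropWhile_cons_of_pos hq]
          simp [pvCloseLast_cons]
        · have hq' : pvIsQ h = false := by simpa using hq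
          have step : pvStepA (rs ++ [x], true) h =
              (pvCloseLast (rs ++ [x]) ++ [h], false) := by
            simp [pvStepA, hq']
          rw [List.foldl_cons, step, (ih t ht).1 (pvCloseLast (rs ++ [x]) ++ [h])]
          rw [List.takeWhile_cons_of_neg (by simp [hq']), List.dropWhile_cons_of_neg (by simp [hq'])]
          rw [pvGoB_cons_nq h t hq', pvCloseLast_append]
          simp

-- ===== VERDICT (by name: the statement is the Claim_ definition above) =====
theorem mark_quotes_spec : Claim_equal_mark_quotes := by
  intro text _
  unfold Spec_mark_quotes mark_quotes mark_quotes_alt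
  have := (pvMain (PySem.Chars.splitOn text.toList ['\n']).length
      (PySem.Chars.splitOn text.toList ['\n']) le_rfl).1 []
  simp only [List.nil_append] at this
  simp [this]
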